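-- pv_equiv track=rewrite | github.com/ssloxford/evaluation-pitfalls-touch | experiments/utils.py | intra_session
-- ===== SOURCE A (Python) =====
-- def balance_examples(X_positive, X_negative):
--
--     # Truncate negative or positive class as needed, then combine
--
--     if len(X_negative) > len(X_positive):
--         X_negative = X_negative[: len(X_positive)]
--     elif len(X_negative) < len(X_positive):
--         X_positive = X_positive[: len(X_negative)]
--
--     X = X_negative + X_positive
--     y = ([0] * len(X_negative)) + ([1] * len(X_positive))
--
--     return X, y
--
-- def intra_session(
--     user_touches, user_touches_shuffled, user, train_users, test_users, session
-- ):
--     p_strokes = len(user_touches[user][session])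
--     p_strokes_80 = int(p_strokes * 0.8)
--
--     # Generate positive train examples
--     X_train_positive = user_touches[user][session][:p_strokes_80]
--
--     # Generate negative training data
--     X_train_negative = []
--     depth = 0
--     added = True
--     while added:
--         added = False
--         for u in train_users:
--             if u != user and len(user_touches_shuffled[u]) > depth:
--                 X_train_negative.append(user_touches_shuffled[u][depth])
--                 added = True
--
--         depth += 1
--
--     X_train, y_train = balance_examples(X_train_positive, X_train_negative)
--
--     # Generate positive test examples
--     X_test_positive = user_touches[user][session][p_strokes_80:]
--
--     # Generate negative testing examples
--     X_test_negative = []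
--     depth = 0
--     added = True
--     while added:
--         added = False
--         for u in test_users:
--             if u != user and len(user_touches_shuffled[u]) > depth:
--                 X_test_negative.append(user_touches_shuffled[u][depth])
--                 added = True
--
--         depth += 1
--
--     X_test = X_test_negative + X_test_positive
--     y_test = ([0] * len(X_test_negative)) + ([1] * len(X_test_positive))
--
--     return X_train, X_test, y_train, y_test
-- ===== SOURCE B (Python) =====
-- # B: negatives via tag-and-stable-sort -- collect (depth, touch) pairs user-by-user,
-- # then one stable sort by depth recovers A's depth-major, user-minor order; balancing
-- # by a single min-length truncation.  Same values, different construction.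
-- def intra_session(
--     user_touches, user_touches_shuffled, user, train_users, test_users, session
-- ):
--     strokes = user_touches[user][session]
--     cut = int(len(strokes) * 0.8)
--
--     def negatives(users):
--         tagged = []
--         for u in users:
--             if u != user:
--                 tagged.extend(enumerate(user_touches_shuffled[u]))
--         tagged.sort(key=lambda p: p[0])  # stable: ties keep user order
--         return [t for _, t in tagged]
--
--     train_neg = negatives(train_users)
--     test_neg = negatives(test_users)
--     train_pos = strokes[:cut]
--     test_pos = strokes[cut:]
--
--     n = min(len(train_neg), len(train_pos))
--     return (
--         train_neg[:n] + train_pos[:n],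
--         test_neg + test_pos,
--         [0] * n + [1] * n,
--         [0] * len(test_neg) + [1] * len(test_pos),
--     )
-- ===== Notes on version B (the rewrite author's own statement) =====
-- stated objective: alternative
-- what changed: The negative-example sampler's while/added-flag round-robin loop is replaced by a tag-and-sort algorithm: collect (depth, touch) pairs user-by-user with enumerate, then one stable sort by depth recovers the same order; balance_examples' if/elif truncation branches are replaced by a single min-length truncation.
-- outside the precondition, e.g. on intra_session({'a': {0: [[1], [2]]}}, {}, 'a', ['b'], [], 0): A raises KeyError, B raises KeyError
import Mathlib
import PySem

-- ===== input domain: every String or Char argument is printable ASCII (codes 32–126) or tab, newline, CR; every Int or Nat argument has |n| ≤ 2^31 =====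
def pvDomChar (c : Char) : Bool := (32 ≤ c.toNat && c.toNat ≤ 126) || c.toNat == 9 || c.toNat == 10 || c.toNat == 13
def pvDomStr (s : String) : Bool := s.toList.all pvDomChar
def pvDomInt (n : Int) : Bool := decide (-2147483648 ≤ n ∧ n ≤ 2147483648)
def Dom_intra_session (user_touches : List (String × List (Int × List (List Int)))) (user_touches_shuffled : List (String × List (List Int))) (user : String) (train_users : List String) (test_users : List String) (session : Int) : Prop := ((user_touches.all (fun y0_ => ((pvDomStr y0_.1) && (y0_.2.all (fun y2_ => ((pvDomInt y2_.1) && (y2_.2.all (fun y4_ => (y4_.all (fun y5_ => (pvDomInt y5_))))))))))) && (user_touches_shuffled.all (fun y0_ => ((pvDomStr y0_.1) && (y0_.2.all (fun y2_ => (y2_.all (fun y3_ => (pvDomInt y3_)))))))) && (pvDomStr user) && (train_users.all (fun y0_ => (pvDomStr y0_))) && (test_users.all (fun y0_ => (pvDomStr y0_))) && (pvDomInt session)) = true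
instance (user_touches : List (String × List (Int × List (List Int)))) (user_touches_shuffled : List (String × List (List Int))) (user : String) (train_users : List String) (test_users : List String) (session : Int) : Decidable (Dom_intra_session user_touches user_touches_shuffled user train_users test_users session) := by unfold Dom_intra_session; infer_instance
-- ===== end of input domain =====

-- B replaces A's while/added-flag negative-sampling loop by tag-and-stable-sort
-- ((depth, touch) pairs collected user-by-user, one stable sort by depth) and the
-- balancing branches by a single min-length truncation; equal values proved on Pre_.

-- exact port of Python's `int(n * 0.8)` for n ≥ 0: 0.8 is the IEEE-754 double
-- 3602879701896397/2^52; the product is rounded to 53 significant bits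
-- (nearest, ties to even) and then truncated.  Shared by both ports, since
-- both Pythons contain the expression `int(len(...) * 0.8)` verbatim.
def pyInt08 (n : Nat) : Nat :=
  let N := n * 3602879701896397
  let k := if N = 0 then 0 else N.log2 + 1
  if k ≤ 53 then N / 2 ^ 52
  else
    let t := k - 53
    let q := N / 2 ^ t
    let r := N % 2 ^ t
    let half := 2 ^ (t - 1)
    let s := if half < r ∨ (r = half ∧ q % 2 = 1) then q + 1 else q
    (s * 2 ^ t) / 2 ^ 52

-- ===== PORT A =====
-- helper of A, ported literally (the if/elif truncation, then concatenation)
def balance_examples (X_positive X_negative : List (List Int)) : List (List Int) × List Int :=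
  let p :=
    if X_positive.length < X_negative.length then (X_negative.take X_positive.length, X_positive)
    else if X_negative.length < X_positive.length then (X_negative, X_positive.take X_negative.length)
    else (X_negative, X_positive)
  (p.1 ++ p.2, List.replicate p.1.length (0 : Int) ++ List.replicate p.2.length (1 : Int))

-- one pass of A's `for u in users` body over the state (X_negative, added)
def aNegPass (uts : List (String × List (List Int))) (user : String) (users : List String)
    (depth : Nat) (acc : List (List Int)) (added : Bool) : List (List Int) × Bool :=
  users.foldl (fun st u =>
    if u ≠ user ∧ depth < (((PySem.Dict.mk uts).get? u).getD []).length then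
      (st.1 ++ [(((PySem.Dict.mk uts).get? u).getD []).getD depth []], true)
    else st) (acc, added)

-- A's `while added:` loop; fuel = (max list length in uts) + 1 only makes it total
def aNegLoop (uts : List (String × List (List Int))) (user : String) (users : List String) :
    Nat → Nat → List (List Int) → List (List Int)
  | 0, _, acc => acc
  | fuel + 1, depth, acc =>
    let st := aNegPass uts user users depth acc false
    if st.2 then aNegLoop uts user users fuel (depth + 1) st.1 else st.1

def intra_session (user_touches : List (String × List (Int × List (List Int)))) (user_touches_shuffled : List (String × List (List Int))) (user : String) (train_users : List String) (test_users : List String) (session : Int) : List (List Int) × List (List Int) × List Int × List Int :=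
  -- user_touches[user][session]; lookups cannot fail under Pre_ (getD [] is unreachable there)
  let strokes := (((PySem.Dict.mk (((PySem.Dict.mk user_touches).get? user).getD [])).get? session).getD [])
  let p_strokes := strokes.length
  let p_strokes_80 := pyInt08 p_strokes
  let X_train_positive := strokes.take p_strokes_80
  let fuel := (user_touches_shuffled.map (fun kv => kv.2.length)).foldl max 0 + 1
  let X_train_negative := aNegLoop user_touches_shuffled user train_users fuel 0 []
  let tr := balance_examples X_train_positive X_train_negative
  let X_test_positive := strokes.drop p_strokes_80
  let X_test_negative := aNegLoop user_touches_shuffled user test_users fuel 0 []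
  (tr.1, X_test_negative ++ X_test_positive, tr.2,
   List.replicate X_test_negative.length (0 : Int) ++ List.replicate X_test_positive.length (1 : Int))

-- ===== PORT B =====
-- B's `negatives`: the tagged (depth, touch) pairs collected user-by-user,
-- then one stable sort by depth (`tagged.sort(key=lambda p: p[0])`), tags stripped
def bNegatives (uts : List (String × List (List Int))) (user : String) (users : List String) :
    List (List Int) :=
  let tagged := users.foldl (fun acc u =>
    if u ≠ user then acc ++ PySem.List.enumerate (((PySem.Dict.mk uts).get? u).getD []) else acc)
    ([] : List (Int × List Int))
  (PySem.List.sorted tagged (fun p => p.1) false).map (fun p => p.2)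

def intra_session_alt (user_touches : List (String × List (Int × List (List Int)))) (user_touches_shuffled : List (String × List (List Int))) (user : String) (train_users : List String) (test_users : List String) (session : Int) : List (List Int) × List (List Int) × List Int × List Int :=
  let strokes := (((PySem.Dict.mk (((PySem.Dict.mk user_touches).get? user).getD [])).get? session).getD [])
  let cut := pyInt08 strokes.length
  let train_neg := bNegatives user_touches_shuffled user train_users
  let test_neg := bNegatives user_touches_shuffled user test_users
  let train_pos := strokes.take cut
  let test_pos := strokes.drop cut
  let n := min train_neg.length train_pos.length
  (train_neg.take n ++ train_pos.take n, test_neg ++ test_pos,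
   List.replicate n (0 : Int) ++ List.replicate n (1 : Int),
   List.replicate test_neg.length (0 : Int) ++ List.replicate test_pos.length (1 : Int))

-- ===== PRECONDITION & SPEC =====
-- Pre_ excludes exactly the inputs where the Python A raises KeyError: `user` missing from
-- user_touches, `session` missing from user_touches[user], or some listed u ≠ user missing
-- from user_touches_shuffled.
def Pre_intra_session (user_touches : List (String × List (Int × List (List Int)))) (user_touches_shuffled : List (String × List (List Int))) (user : String) (train_users : List String) (test_users : List String) (session : Int) : Prop :=
  (((PySem.Dict.mk user_touches).get? user).bind
      (fun d => (PySem.Dict.mk d).get? session)).isSome = true ∧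
  ∀ u ∈ train_users ++ test_users, u ≠ user → ((PySem.Dict.mk user_touches_shuffled).get? u).isSome = true
instance (user_touches : List (String × List (Int × List (List Int)))) (user_touches_shuffled : List (String × List (List Int))) (user : String) (train_users : List String) (test_users : List String) (session : Int) : Decidable (Pre_intra_session user_touches user_touches_shuffled user train_users test_users session) := by unfold Pre_intra_session; infer_instance

def pvWitness_intra_session : (List (String × List (Int × List (List Int)))) × (List (String × List (List Int))) × String × List String × List String × Int :=
  ([("a", [((0 : Int), [[1], [2]])])], [("b", [[3]])], "a", ["b"], ["b"], (0 : Int))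

def Spec_intra_session (user_touches : List (String × List (Int × List (List Int)))) (user_touches_shuffled : List (String × List (List Int))) (user : String) (train_users : List String) (test_users : List String) (session : Int) (out : List (List Int) × List (List Int) × List Int × List Int) : Prop := out = intra_session_alt user_touches user_touches_shuffled user train_users test_users session
instance (user_touches : List (String × List (Int × List (List Int)))) (user_touches_shuffled : List (String × List (List Int))) (user : String) (train_users : List String) (test_users : List String) (session : Int) (out : List (List Int) × List (List Int) × List Int × List Int) : Decidable (Spec_intra_session user_touches user_touches_shuffled user train_users test_users session out) := by unfold Spec_intra_session; infer_instance

-- ===== CLAIM (what is proved, stated in full; the proofs are below) =====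
def Claim_equal_intra_session : Prop := ∀ (user_touches : List (String × List (Int × List (List Int)))) (user_touches_shuffled : List (String × List (List Int))) (user : String) (train_users : List String) (test_users : List String) (session : Int), Dom_intra_session user_touches user_touches_shuffled user train_users test_users session → Pre_intra_session user_touches user_touches_shuffled user train_users test_users session → Spec_intra_session user_touches user_touches_shuffled user train_users test_users session (intra_session user_touches user_touches_shuffled user train_users test_users session)

-- ===== LEMMAS AND PROOFS =====

-- the filtered lookup lists both sides iterate over
def negLists (uts : List (String × List (List Int))) (user : String) (users : List String) :
    List (List (List Int)) :=
  (users.filter (fun u => u ≠ user)).map (fun u => (((PySem.Dict.mk uts).get? u).getD []))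

-- the elements one depth contributes (A's inner for-pass at depth d)
def negPassOut (L : List (List (List Int))) (d : Nat) : List (List Int) :=
  (L.filter (fun l => d < l.length)).map (fun l => l.getD d [])

-- the tagged elements one depth contributes (B's sorted output, depth-d block)
def tBlock (L : List (List (List Int))) (d : Nat) : List (Int × List Int) :=
  (L.filter (fun l => d < l.length)).map (fun l => ((d : Int), l.getD d []))

-- depth-major concatenation of the blocks
def tList (L : List (List (List Int))) (M : Nat) : List (Int × List Int) :=
  (List.range M).flatMap (tBlock L)

-- ---------- A side: the while/added loop produces the depth-major concatenation ----------

lemma aNegPass_cons (uts : List (String × List (List Int))) (user : String) (depth : Nat)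
    (u : String) (us : List String) (acc : List (List Int)) (added : Bool) :
    aNegPass uts user (u :: us) depth acc added =
      if u ≠ user ∧ depth < (((PySem.Dict.mk uts).get? u).getD []).length then
        aNegPass uts user us depth (acc ++ [(((PySem.Dict.mk uts).get? u).getD []).getD depth []]) true
      else aNegPass uts user us depth acc added := by
  simp only [aNegPass, List.foldl_cons]
  split <;> rfl

lemma aNegPass_eq (uts : List (String × List (List Int))) (user : String) (depth : Nat) :
    ∀ (users : List String) (acc : List (List Int)) (added : Bool),
      aNegPass uts user users depth acc added =
        (acc ++ negPassOut (negLists uts user users) depth,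
         added || (negLists uts user users).any (fun l => depth < l.length)) := by
  intro users
  induction users with
  | nil => intro acc added; simp [aNegPass, negLists, negPassOut]
  | cons u us ih =>
    intro acc added
    by_cases hu : u = user
    · rw [aNegPass_cons, if_neg (by simp [hu]), ih]
      simp [negLists, negPassOut, hu]
    · by_cases hd : depth < (((PySem.Dict.mk uts).get? u).getD []).length
      · rw [aNegPass_cons, if_pos ⟨hu, hd⟩, ih]
        simp [negLists, negPassOut, hu, hd]
      · rw [aNegPass_cons, if_neg (by simp [hd]), ih]
        simp [negLists, negPassOut, hu, hd]

lemma foldl_max_le_iff (c : Nat) : ∀ (xs : List Nat) (a : Nat),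
    xs.foldl max a ≤ c ↔ a ≤ c ∧ ∀ x ∈ xs, x ≤ c := by
  intro xs
  induction xs with
  | nil => simp
  | cons x xs ih =>
    intro a
    simp only [List.foldl_cons, ih, List.mem_cons]
    constructor
    · rintro ⟨h1, h2⟩
      exact ⟨le_of_max_le_left h1, fun y hy => hy.elim (fun e => e ▸ le_of_max_le_right h1) (h2 y)⟩
    · rintro ⟨h1, h2⟩
      exact ⟨max_le h1 (h2 x (Or.inl rfl)), fun y hy => h2 y (Or.inr hy)⟩

lemma aNegLoop_eq (uts : List (String × List (List Int))) (user : String) (users : List String) :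
    ∀ (fuel depth : Nat) (acc : List (List Int)),
      ((negLists uts user users).map List.length).foldl max 0 ≤ depth + fuel →
      aNegLoop uts user users fuel depth acc =
        acc ++ (List.range' depth
            (((negLists uts user users).map List.length).foldl max 0 - depth)).flatMap
          (negPassOut (negLists uts user users)) := by
  intro fuel
  set L := negLists uts user users with hL
  set M := (L.map List.length).foldl max 0 with hM
  induction fuel with
  | zero =>
    intro depth acc h
    simp only [Nat.add_zero] at h
    rw [Nat.sub_eq_zero_of_le h]
    simp [aNegLoop]
  | succ f ih =>
    intro depth acc h
    rw [aNegLoop, aNegPass_eq]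
    by_cases hany : L.any (fun l => depth < l.length)
    · simp only [← hL, hany, Bool.false_or, if_true]
      have hdM : depth < M := by
        simp only [List.any_eq_true, decide_eq_true_eq] at hany
        obtain ⟨l, hl, hdl⟩ := hany
        have := (PySem.List.le_foldl_max_nat L List.length 0).2 l hl
        rw [List.foldl_map] at hM
        omega
      rw [ih (depth + 1) _ (by omega)]
      rw [show M - depth = (M - (depth + 1)) + 1 by omega, List.range'_succ]
      simp
    · simp only [← hL, hany, Bool.false_or]
      have hMd : M ≤ depth := by
        simp only [List.any_eq_true, decide_eq_true_eq, not_exists, not_and] at hany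
        rw [hM, foldl_max_le_iff]
        refine ⟨Nat.zero_le _, fun x hx => ?_⟩
        obtain ⟨l, hl, rfl⟩ := List.mem_map.mp hx
        have := hany l hl
        omega
      rw [Nat.sub_eq_zero_of_le hMd]
      have : negPassOut L depth = [] := by
        simp only [List.any_eq_true, decide_eq_true_eq, not_exists, not_and] at hany
        simp only [negPassOut, List.map_eq_nil_iff, List.filter_eq_nil_iff, decide_eq_true_eq]
        intro l hl
        exact hany l hl
      simp [this]

lemma value_le_fold (uts : List (String × List (List Int))) (u : String) :
    (((PySem.Dict.mk uts).get? u).getD []).length ≤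
      (uts.map (fun kv => kv.2.length)).foldl max 0 := by
  cases hg : (PySem.Dict.mk uts).get? u with
  | none => simp
  | some v =>
    have hmem : (u, v) ∈ (PySem.Dict.mk uts).items := PySem.Dict.mem_items_of_get?_eq_some _ hg
    have hv : v.length ∈ uts.map (fun kv => kv.2.length) := by
      simp only [List.mem_map]
      exact ⟨(u, v), hmem, rfl⟩
    have := (PySem.List.le_foldl_max (uts.map (fun kv => kv.2.length)) 0).2 _ hv
    simpa using this

lemma negLists_le_fold (uts : List (String × List (List Int))) (user : String)
    (users : List String) :
    ((negLists uts user users).map List.length).foldl max 0 ≤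
      (uts.map (fun kv => kv.2.length)).foldl max 0 := by
  rw [foldl_max_le_iff]
  refine ⟨Nat.zero_le _, fun x hx => ?_⟩
  obtain ⟨l, hl, rfl⟩ := List.mem_map.mp hx
  simp only [negLists] at hl
  obtain ⟨u, _, rfl⟩ := List.mem_map.mp hl
  exact value_le_fold uts u

-- ---------- B side: stable sort of the user-major tagged list is the depth-major list ----------

-- insertBy inserts x before the first y with `before x y`
lemma insertBy_eq {α : Type} (before : α → α → Bool) (x : α) : ∀ (ys : List α),
    PySem.List.insertBy before x ys =
      ys.takeWhile (fun y => !before x y) ++ x :: ys.dropWhile (fun y => !before x y) := by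
  intro ys
  induction ys with
  | nil => rfl
  | cons y t ih =>
    by_cases h : before x y = true
    · simp [PySem.List.insertBy, h]
    · simp only [Bool.not_eq_true] at h
      simp [PySem.List.insertBy, h, ih]

lemma sorted_append_singleton {α κ : Type} [LT κ] [DecidableLT κ]
    (xs : List α) (x : α) (key : α → κ) :
    PySem.List.sorted (xs ++ [x]) key false =
      PySem.List.insertBy (fun a b => decide (key a < key b)) x
        (PySem.List.sorted xs key false) := by
  rw [PySem.List.sorted_eq_foldl_insertBy, PySem.List.sorted_eq_foldl_insertBy,
    List.foldl_append]
  rfl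

-- split a list at the LAST element its filter keeps
lemma filter_eq_append_singleton {α : Type} (p : α → Bool) (l zs : List α) (x : α)
    (h : l.filter p = zs ++ [x]) :
    ∃ l₁ l₂, l = l₁ ++ x :: l₂ ∧ l₁.filter p = zs ∧ l₂.filter p = [] := by
  have hr : l.reverse.filter p = x :: zs.reverse := by
    rw [List.filter_reverse, h]; simp
  rw [List.filter_eq_cons_iff] at hr
  obtain ⟨r₁, r₂, hrev, hr₁, hpx, hr₂⟩ := hr
  refine ⟨r₂.reverse, r₁.reverse, ?_, ?_, ?_⟩
  · have := congrArg List.reverse hrev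
    simpa using this
  · rw [← List.reverse_reverse (List.filter p r₂.reverse), List.filter_reverse, hr₂]
    simp
  · rw [List.filter_reverse, List.filter_eq_nil_iff.mpr hr₁]
    rfl

-- stability characterization: a key-sorted list with the same per-key sublists
-- as xs IS sorted(xs, key=fst)
lemma stable_sorted_fst {β : Type} : ∀ (xs ys : List (Int × β)),
    ys.Pairwise (fun a b => a.1 ≤ b.1) →
    (∀ k : Int, ys.filter (fun a => a.1 == k) = xs.filter (fun a => a.1 == k)) →
    PySem.List.sorted xs (fun p => p.1) false = ys := by
  intro xs
  induction xs using List.reverseRecOn with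
  | nil =>
    intro ys _ hf
    cases ys with
    | nil => rfl
    | cons y t =>
      have := hf y.1
      simp at this
  | append_singleton xs x ih =>
    intro ys hp hf
    have hx : ys.filter (fun a => a.1 == x.1) =
        xs.filter (fun a => a.1 == x.1) ++ [x] := by
      rw [hf x.1, List.filter_append]; simp
    obtain ⟨ys₁, ys₂, rfl, h₁, h₂⟩ := filter_eq_append_singleton _ ys _ x hx
    have hsub : (ys₁ ++ ys₂).Sublist (ys₁ ++ x :: ys₂) :=
      (List.sublist_cons_self x ys₂).append_left ys₁
    have hp' : (ys₁ ++ ys₂).Pairwise (fun a b => a.1 ≤ b.1) := hp.sublist hsub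
    have hle₁ : ∀ y ∈ ys₁, y.1 ≤ x.1 := by
      rw [List.pairwise_append] at hp
      intro y hy
      exact hp.2.2 y hy x (List.mem_cons_self)
    have hlt₂ : ∀ z ∈ ys₂, x.1 < z.1 := by
      rw [List.pairwise_append] at hp
      intro z hz
      have hle : x.1 ≤ z.1 := (List.pairwise_cons.mp hp.2.1).1 z hz
      have hne : ¬ (z.1 == x.1) = true := by
        intro hzx
        have : z ∈ ys₂.filter (fun a => a.1 == x.1) := List.mem_filter.mpr ⟨hz, hzx⟩
        rw [h₂] at this
        exact absurd this (List.not_mem_nil)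
      simp only [beq_iff_eq] at hne
      omega
    have hfs : ∀ k : Int, (ys₁ ++ ys₂).filter (fun a => a.1 == k) =
        xs.filter (fun a => a.1 == k) := by
      intro k
      by_cases hk : k = x.1
      · subst hk
        rw [List.filter_append, h₁, h₂, List.append_nil]
      · have hthis := hf k
        have hxk : (x.1 == k) = false := by simp [Ne.symm hk]
        simp only [List.filter_append, List.filter_cons, hxk, Bool.false_eq_true,
          if_false, List.filter_nil, List.append_nil] at hthis
        rw [List.filter_append, hthis]
    have hih := ih (ys₁ ++ ys₂) hp' hfs
    rw [sorted_append_singleton, hih, insertBy_eq]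
    have htk₁ : ∀ y ∈ ys₁, (!decide (x.1 < y.1)) = true := by
      intro y hy
      have := hle₁ y hy
      simp; omega
    rw [List.takeWhile_append, List.dropWhile_append]
    rw [List.takeWhile_eq_self_iff.mpr htk₁]
    simp only [List.dropWhile_eq_nil_iff.mpr htk₁]
    cases ys₂ with
    | nil => simp
    | cons z t =>
      have hz := hlt₂ z List.mem_cons_self
      simp [hz]

-- enumerate's filter at one key
lemma enum_filter : ∀ (l : List (List Int)) (s k : Int),
    (PySem.List.enumerate l s).filter (fun p => p.1 == k) =
      if s ≤ k ∧ k < s + l.length then [(k, l.getD (k - s).toNat [])] else [] := by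
  intro l
  induction l with
  | nil =>
    intro s k
    simp only [PySem.List.enumerate_nil, List.filter_nil, List.length_nil, Nat.cast_zero]
    rw [if_neg (by omega)]
  | cons x t ih =>
    intro s k
    rw [PySem.List.enumerate_cons, List.filter_cons]
    simp only [List.length_cons, Nat.cast_add, Nat.cast_one]
    by_cases hsk : s = k
    · subst hsk
      have ht : (PySem.List.enumerate t (s + 1)).filter (fun p => p.1 == s) = [] := by
        rw [ih, if_neg (by omega)]
      simp only [beq_self_eq_true, if_true, ht]
      rw [if_pos (by omega)]
      simp
    · simp only [show (s == k) = false from by simp [hsk], Bool.false_eq_true, if_false]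
      rw [ih]
      by_cases hc : s + 1 ≤ k ∧ k < s + 1 + t.length
      · rw [if_pos hc, if_pos (by omega)]
        have h1 : (k - s).toNat = (k - (s + 1)).toNat + 1 := by omega
        simp [h1]
      · rw [if_neg hc, if_neg (by omega)]

-- flatMap of conditional singletons is filter-then-map
lemma flatMap_ite_singleton {α β : Type} (L : List α) (c : α → Bool) (f : α → β) :
    L.flatMap (fun l => if c l then [f l] else []) = (L.filter c).map f := by
  induction L with
  | nil => rfl
  | cons x t ih =>
    by_cases h : c x
    · simp [List.flatMap_cons, h, ih]
    · simp [List.flatMap_cons, h, ih]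

-- the user-major tagged list B sorts
lemma tagged_filter (L : List (List (List Int))) (k : Int) :
    (L.flatMap (fun l => PySem.List.enumerate l)).filter (fun p => p.1 == k) =
      if 0 ≤ k then tBlock L k.toNat else [] := by
  rw [List.filter_flatMap]
  by_cases hk : 0 ≤ k
  · rw [if_pos hk]
    have : ∀ l : List (List Int),
        (PySem.List.enumerate l).filter (fun p => p.1 == k) =
          if decide (k.toNat < l.length) then [(((k.toNat : Nat) : Int), l.getD k.toNat [])]
          else [] := by
      intro l
      rw [show PySem.List.enumerate l = PySem.List.enumerate l 0 from rfl, enum_filter]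
      by_cases hc : k < (l.length : Int)
      · rw [if_pos (by constructor <;> omega), if_pos (by simp; omega)]
        congr 1
        simp
        omega
      · rw [if_neg (by omega), if_neg (by simp; omega)]
    simp only [this]
    rw [List.flatMap_congr (by intro l _; rfl), flatMap_ite_singleton]
    rfl
  · rw [if_neg hk]
    simp only [List.flatMap_eq_nil_iff]
    intro l _
    rw [show PySem.List.enumerate l = PySem.List.enumerate l 0 from rfl, enum_filter]
    rw [if_neg (by omega)]

-- block membership: every tag in tBlock L d is d
lemma mem_tBlock_fst {L : List (List (List Int))} {d : Nat} {p : Int × List Int}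
    (h : p ∈ tBlock L d) : p.1 = (d : Int) := by
  obtain ⟨l, _, rfl⟩ := List.mem_map.mp h
  rfl

lemma tBlock_filter (L : List (List (List Int))) (d : Nat) (k : Int) :
    (tBlock L d).filter (fun p => p.1 == k) = if (d : Int) = k then tBlock L d else [] := by
  by_cases h : (d : Int) = k
  · rw [if_pos h]
    apply List.filter_eq_self.mpr
    intro p hp
    simp [mem_tBlock_fst hp, h]
  · rw [if_neg h]
    apply List.filter_eq_nil_iff.mpr
    intro p hp
    simp [mem_tBlock_fst hp, h]

-- a flatMap over range M in which at most the j-th summand is nonempty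
lemma flatMap_range_single {α : Type} (g : Nat → List α) (M j : Nat) (hj : j < M)
    (h : ∀ d, d < M → d ≠ j → g d = []) : (List.range M).flatMap g = g j := by
  induction M with
  | zero => omega
  | succ m ih =>
    rw [List.range_succ, List.flatMap_append]
    by_cases hjm : j = m
    · subst hjm
      have : (List.range j).flatMap g = [] := by
        apply List.flatMap_eq_nil_iff.mpr
        intro d hd
        have := List.mem_range.mp hd
        exact h d (by omega) (by omega)
      simp [this]
    · rw [ih (by omega) (fun d hd hdj => h d (by omega) hdj)]
      simp [h m (by omega) (fun e => hjm e.symm)]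

lemma tList_filter (L : List (List (List Int))) (M : Nat)
    (hM : ∀ l ∈ L, l.length ≤ M) (k : Int) :
    (tList L M).filter (fun p => p.1 == k) = if 0 ≤ k then tBlock L k.toNat else [] := by
  have hbig : ∀ d : Nat, M ≤ d → tBlock L d = [] := by
    intro d hd
    simp only [tBlock, List.map_eq_nil_iff, List.filter_eq_nil_iff, decide_eq_true_eq]
    intro l hl
    have := hM l hl
    omega
  rw [tList, List.filter_flatMap]
  simp only [tBlock_filter]
  by_cases hk : 0 ≤ k
  · rw [if_pos hk]
    by_cases hkM : k.toNat < M
    · rw [flatMap_range_single _ M k.toNat hkM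
        (fun d hd hdj => by rw [if_neg (by omega)])]
      rw [if_pos (by omega)]
    · rw [show tBlock L k.toNat = [] from hbig k.toNat (by omega)]
      apply List.flatMap_eq_nil_iff.mpr
      intro d hd
      have := List.mem_range.mp hd
      rw [if_neg (by omega)]
  · rw [if_neg hk]
    apply List.flatMap_eq_nil_iff.mpr
    intro d hd
    rw [if_neg (by omega)]

lemma tList_pairwise (L : List (List (List Int))) (M : Nat) :
    (tList L M).Pairwise (fun a b => a.1 ≤ b.1) := by
  induction M with
  | zero => simp [tList]
  | succ m ih =>
    rw [tList, List.range_succ, List.flatMap_append]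
    rw [List.pairwise_append]
    refine ⟨ih, ?_, ?_⟩
    · simp only [List.flatMap_cons, List.flatMap_nil, List.append_nil]
      apply List.Pairwise.map
      case H => intro a b _; exact le_refl _
      exact List.pairwise_of_forall (fun _ _ => trivial) |>.imp (fun _ => trivial)
    · intro a ha b hb
      obtain ⟨d, hd, hda⟩ := List.mem_flatMap.mp ha
      have hfa := mem_tBlock_fst hda
      simp only [List.flatMap_cons, List.flatMap_nil, List.append_nil] at hb
      have hfb := mem_tBlock_fst hb
      rw [hfa, hfb]
      have : d < m := by simpa using List.mem_range.mp hd
      omega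

lemma map_snd_tList (L : List (List (List Int))) (M : Nat) :
    (tList L M).map (fun p => p.2) = (List.range M).flatMap (negPassOut L) := by
  rw [tList, List.map_flatMap]
  apply List.flatMap_congr
  intro d _
  rw [tBlock, negPassOut, List.map_map]
  rfl

-- B's negatives equal A's loop output
lemma bNegatives_eq_loop (uts : List (String × List (List Int))) (user : String)
    (users : List String) :
    bNegatives uts user users =
      aNegLoop uts user users ((uts.map (fun kv => kv.2.length)).foldl max 0 + 1) 0 [] := by
  set L := negLists uts user users with hL
  set M := ((L.map List.length).foldl max 0) with hM
  have hMl : ∀ l ∈ L, l.length ≤ M := by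
    intro l hl
    have : l.length ∈ L.map List.length := List.mem_map.mpr ⟨l, hl, rfl⟩
    exact (PySem.List.le_foldl_max (L.map List.length) 0).2 _ this
  -- the tagged list is the flatMap of enumerations over negLists
  have htag : users.foldl (fun acc u =>
      if u ≠ user then acc ++ PySem.List.enumerate (((PySem.Dict.mk uts).get? u).getD [])
      else acc) ([] : List (Int × List Int)) =
      L.flatMap (fun l => PySem.List.enumerate l) := by
    rw [PySem.List.foldl_ite_eq_foldl_filter, PySem.List.foldl_append_eq_flatMap]
    rw [hL, negLists, List.flatMap_map]
    rfl
  have hsort : PySem.List.sorted (L.flatMap (fun l => PySem.List.enumerate l))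
      (fun p => p.1) false = tList L M := by
    apply stable_sorted_fst
    · exact tList_pairwise L M
    · intro k
      rw [tagged_filter, tList_filter L M hMl]
  rw [aNegLoop_eq uts user users _ 0 []
      (le_trans (negLists_le_fold uts user users) (by omega))]
  rw [bNegatives]
  simp only [htag, hsort]
  rw [map_snd_tList]
  rw [← hL, ← hM]
  simp [List.range_eq_range']

-- ---------- balancing ----------

lemma balance_eq (Xp Xn : List (List Int)) :
    balance_examples Xp Xn =
      (Xn.take (min Xn.length Xp.length) ++ Xp.take (min Xn.length Xp.length),
       List.replicate (min Xn.length Xp.length) (0 : Int) ++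
         List.replicate (min Xn.length Xp.length) (1 : Int)) := by
  unfold balance_examples
  rcases Nat.lt_trichotomy Xp.length Xn.length with h | h | h
  · rw [if_pos h]
    simp [Nat.min_eq_right (Nat.le_of_lt h), Nat.min_eq_left (Nat.le_of_lt h)]
  · rw [if_neg (by omega), if_neg (by omega)]
    simp [← h, List.take_of_length_le h.ge, List.take_of_length_le (Nat.le_refl Xp.length)]
  · rw [if_neg (by omega), if_pos h]
    simp [Nat.min_eq_left (Nat.le_of_lt h)]

-- ===== VERDICT (by name: the statement is the Claim_ definition above) =====
theorem intra_session_spec : Claim_equal_intra_session := by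
  intro ut uts user tr te sess _ _
  show _ = _
  simp only [intra_session, intra_session_alt]
  simp only [← bNegatives_eq_loop, balance_eq]
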